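-- pv_equiv track=rewrite | github.com/madskinner/pub2sd2 | pub2sd/myclasses/backend.py | to_alpha
-- ===== SOURCE A (Python) =====
-- def to_alpha(anumber):
--     """Convert a positive number n to its digit representation in base 26."""
--     output = ''
--     a_number = anumber
--     if anumber == 0:
--         pass
--     else:
--         while a_number > 0:
--             output += chr(a_number % 26 + ord('A'))
--             a_number = a_number // 26
--     return output[::-1]
-- ===== SOURCE B (Python) =====
-- def to_alpha(anumber):
--     """Convert a positive number n to its digit representation in base 26."""
--     if anumber <= 0:
--         return ''
--     return to_alpha(anumber // 26) + chr(anumber % 26 + ord('A'))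
-- ===== Notes on version B (the rewrite author's own statement) =====
-- stated objective: simpler
-- what changed: Replaced the while-loop accumulator plus final string reversal with a direct recursion over the quotient that emits the digits in the correct order, so no reversal is needed.
import Mathlib
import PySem

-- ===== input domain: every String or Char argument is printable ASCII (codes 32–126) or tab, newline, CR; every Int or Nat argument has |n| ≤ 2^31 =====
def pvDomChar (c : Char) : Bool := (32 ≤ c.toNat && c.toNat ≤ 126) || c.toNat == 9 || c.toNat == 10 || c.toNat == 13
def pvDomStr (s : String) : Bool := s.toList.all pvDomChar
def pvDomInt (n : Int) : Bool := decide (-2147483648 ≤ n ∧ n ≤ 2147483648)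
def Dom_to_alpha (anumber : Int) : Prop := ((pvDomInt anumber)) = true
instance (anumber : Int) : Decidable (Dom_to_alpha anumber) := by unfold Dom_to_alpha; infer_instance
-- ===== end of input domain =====

-- B changes A's while-loop accumulator + final reversal into a recursion over the quotient
-- that emits the digits already in the correct order (objective: simpler).

-- the quotient shrinks: used for termination of both ports
theorem pvFdLt (n : Int) (h : 0 < n) : (PySem.Int.floordiv n 26).toNat < n.toNat := by
  rw [PySem.Int.floordiv_eq_ediv_of_pos (by norm_num)]
  have h1 : 0 ≤ n / 26 := Int.ediv_nonneg h.le (by norm_num)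
  have h2 : 26 * (n / 26) + n % 26 = n := Int.mul_ediv_add_emod n 26
  have h3 : 0 ≤ n % 26 := Int.emod_nonneg n (by norm_num)
  have h4 : n % 26 < 26 := Int.emod_lt_of_pos n (by norm_num)
  omega

-- ===== PORT A =====
-- the 'while a_number > 0' loop; state = (a_number, output as List Char)
def to_alpha_loop (a : Int) (output : List Char) : List Char :=
  if _h : a > 0 then
    to_alpha_loop (PySem.Int.floordiv a 26)
      (output ++ [Char.ofNat (PySem.Int.mod a 26 + 65).toNat])  -- chr(a % 26 + ord('A'))
  else output
termination_by a.toNat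
decreasing_by exact pvFdLt a _h

def to_alpha (anumber : Int) : String :=
  let output : List Char := []
  let output := if anumber = 0 then output else to_alpha_loop anumber output
  -- output[::-1]; step -1 is never 0, so slice? is always 'some'
  (PySem.Str.slice? (String.ofList output) none none (-1)).getD ""

-- ===== PORT B =====
def to_alpha_alt (anumber : Int) : String :=
  if _h : anumber ≤ 0 then ""
  else
    to_alpha_alt (PySem.Int.floordiv anumber 26) ++
      String.ofList [Char.ofNat (PySem.Int.mod anumber 26 + 65).toNat]
termination_by anumber.toNat
decreasing_by exact pvFdLt anumber (by omega)

-- ===== PRECONDITION & SPEC =====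
def Spec_to_alpha (anumber : Int) (out : String) : Prop := out = to_alpha_alt anumber
instance (anumber : Int) (out : String) : Decidable (Spec_to_alpha anumber out) := by unfold Spec_to_alpha; infer_instance

-- ===== CLAIM (what is proved, stated in full; the proofs are below) =====
def Claim_equal_to_alpha : Prop := ∀ (anumber : Int), Dom_to_alpha anumber → Spec_to_alpha anumber (to_alpha anumber)

-- ===== LEMMAS AND PROOFS =====

-- the loop appends exactly the reverse of B's digit string to the accumulator
theorem pvLoopSpec (a : Int) (output : List Char) :
    to_alpha_loop a output = output ++ (to_alpha_alt a).toList.reverse := by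
  induction a, output using to_alpha_loop.induct with
  | case1 a output h ih =>
    rw [to_alpha_loop, dif_pos h, ih]
    conv_rhs => rw [to_alpha_alt]
    rw [dif_neg (by omega : ¬ a ≤ 0)]
    simp
  | case2 a output h =>
    rw [to_alpha_loop, dif_neg h]
    conv_rhs => rw [to_alpha_alt]
    rw [dif_pos (by omega : a ≤ 0)]
    simp

-- ===== VERDICT (by name: the statement is the Claim_ definition above) =====
theorem to_alpha_spec : Claim_equal_to_alpha := by
  intro anumber _
  unfold Spec_to_alpha to_alpha
  by_cases h0 : anumber = 0
  · subst h0
    simp [PySem.Str.slice?_none_none_neg_one, to_alpha_alt]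
  · simp only [if_neg h0, pvLoopSpec, List.nil_append,
      PySem.Str.slice?_none_none_neg_one, Option.getD_some]
    simp
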